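-- pv_equiv track=rewrite | github.com/eraguzin-bnl/PF_EVAL_Readout | vcd2txt.py | get_values_between_time
-- ===== SOURCE A (Python) =====
-- def get_values_between_time(x, y, start, end):
--     check_start = True
--     for num,i in enumerate(x):
--         if (check_start == True):
--             if i >= start:
--                 start_index = num
--                 check_start = False
--         if i >= end:
--             end_index = num
--             break
--     value_slice = []
--     for i in range(start_index, end_index, 1):
--         value_slice.append(y[i])
--     return(value_slice)
-- ===== SOURCE B (Python) =====
-- def _dropwhile(pred, iterable):
--     it = iter(iterable)
--     for p in it:
--         if not pred(p):
--             yield p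
--             break
--     for p in it:
--         yield p
--
-- def _takewhile(pred, iterable):
--     for p in iterable:
--         if not pred(p):
--             break
--         yield p
--
-- def get_values_between_time(x, y, start, end):
--     window = _takewhile(lambda p: p[0] < end,
--                         _dropwhile(lambda p: p[0] < start, zip(x, y)))
--     return [v for _, v in window]
-- ===== Notes on version B (the rewrite author's own statement) =====
-- stated objective: alternative
-- what changed: Replaces A's enumerate scan with flag and index variables plus a separate index-driven append loop over range(start_index, end_index) by a lazy dropwhile/takewhile generator pipeline over zip(x, y) that emits the y-values directly, with no indices, flags or slicing.
import Mathlib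
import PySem

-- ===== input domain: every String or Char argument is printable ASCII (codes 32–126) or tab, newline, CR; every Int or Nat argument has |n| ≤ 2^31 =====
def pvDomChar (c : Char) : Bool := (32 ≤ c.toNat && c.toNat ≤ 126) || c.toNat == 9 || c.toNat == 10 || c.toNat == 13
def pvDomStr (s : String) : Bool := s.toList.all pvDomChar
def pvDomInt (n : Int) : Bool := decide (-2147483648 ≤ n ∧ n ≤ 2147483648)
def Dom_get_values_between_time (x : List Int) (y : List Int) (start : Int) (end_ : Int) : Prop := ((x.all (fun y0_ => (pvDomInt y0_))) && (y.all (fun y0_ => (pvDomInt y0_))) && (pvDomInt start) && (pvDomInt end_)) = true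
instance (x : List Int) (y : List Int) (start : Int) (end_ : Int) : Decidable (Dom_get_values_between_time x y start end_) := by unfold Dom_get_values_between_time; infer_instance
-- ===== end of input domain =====

-- B replaces A's index-tracking flag scan + index-append loop with a dropwhile/takewhile
-- combinator pipeline over the zipped (time, value) pairs — no indices, no slicing
-- (objective: alternative; return value only).

-- ===== PORT A =====
-- A's first loop: 'for num,i in enumerate(x)' carrying (check_start, start_index);
-- returns (start_index?, end_index?); end_index is set only by the break.
def aLoop (xs : List Int) (num : Nat) (check_start : Bool) (si : Option Nat)
    (start end_ : Int) : Option Nat × Option Nat :=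
  match xs with
  | [] => (si, none)
  | i :: rest =>
    let p : Option Nat × Bool :=
      if check_start then (if i ≥ start then (some num, false) else (si, true))
      else (si, false)
    if i ≥ end_ then (p.1, some num)
    else aLoop rest (num + 1) p.2 p.1 start end_

def get_values_between_time (x : List Int) (y : List Int) (start : Int) (end_ : Int) : List Int :=
  match aLoop x 0 true none start end_ with
  | (some s, some e) =>
      -- for i in range(start_index, end_index, 1): value_slice.append(y[i])
      (PySem.List.pyRange (s : Int) (e : Int) 1).foldl
        (fun acc i => acc ++ [PySem.List.pyGetD y i 0]) []
  | _ => []  -- Python: NameError (start_index/end_index unbound); excluded by Pre_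

-- ===== PORT B =====
-- Source B's _dropwhile / _takewhile generators over zip(x, y) are the pure lazy
-- combinators; on lists they are exactly List.dropWhile / List.takeWhile.
def get_values_between_time_alt (x : List Int) (y : List Int) (start : Int) (end_ : Int) : List Int :=
  (((x.zip y).dropWhile (fun p => decide (p.1 < start))).takeWhile
      (fun p => decide (p.1 < end_))).map Prod.snd

-- ===== PRECONDITION & SPEC =====
-- Pre_ holds exactly where Python A returns: some x[e] ≥ end (e the first such index),
-- some x[s] ≥ start with s ≤ e, and either e ≤ len(y) (all y[i] in range) or the first
-- index ≥ start is e itself (empty range); otherwise A raises NameError/IndexError.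
def Pre_get_values_between_time (x : List Int) (y : List Int) (start : Int) (end_ : Int) : Prop :=
  ∃ e, e < x.length ∧ end_ ≤ x.getD e 0 ∧ (∀ k < e, x.getD k 0 < end_) ∧
    (∃ s, s ≤ e ∧ start ≤ x.getD s 0) ∧
    (e ≤ y.length ∨ (start ≤ x.getD e 0 ∧ ∀ k < e, x.getD k 0 < start))
instance (x : List Int) (y : List Int) (start : Int) (end_ : Int) : Decidable (Pre_get_values_between_time x y start end_) := by
  unfold Pre_get_values_between_time
  have : ∀ P : Nat → Prop, (∀ n, Decidable (P n)) → Decidable (∃ e, e < x.length ∧ P e) := by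
    intro P hP
    exact decidable_of_iff (∃ e < x.length, P e) (by simp)
  infer_instance

def pvWitness_get_values_between_time : List Int × List Int × Int × Int :=
  ([0, 5, 9], [10, 20, 30], 1, 9)

def Spec_get_values_between_time (x : List Int) (y : List Int) (start : Int) (end_ : Int) (out : List Int) : Prop := out = get_values_between_time_alt x y start end_
instance (x : List Int) (y : List Int) (start : Int) (end_ : Int) (out : List Int) : Decidable (Spec_get_values_between_time x y start end_ out) := by unfold Spec_get_values_between_time; infer_instance

-- ===== CLAIM (what is proved, stated in full; the proofs are below) =====
def Claim_equal_get_values_between_time : Prop := ∀ (x : List Int) (y : List Int) (start : Int) (end_ : Int), Dom_get_values_between_time x y start end_ → Pre_get_values_between_time x y start end_ → Spec_get_values_between_time x y start end_ (get_values_between_time x y start end_)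

-- ===== LEMMAS AND PROOFS =====

-- characterisation of the "first index with xs[k] ≥ t" as found by A's scan
def firstGe (t : Int) : List Int → Option Nat
  | [] => none
  | a :: rest => if a ≥ t then some 0 else (firstGe t rest).map (· + 1)

lemma firstGe_eq_some_iff (t : Int) (xs : List Int) (n : Nat) :
    firstGe t xs = some n ↔ n < xs.length ∧ t ≤ xs.getD n 0 ∧ ∀ k < n, xs.getD k 0 < t := by
  induction xs generalizing n with
  | nil => simp [firstGe]
  | cons a rest ih =>
    by_cases h : t ≤ a
    · simp only [firstGe, ge_iff_le, h, if_pos]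
      cases n with
      | zero => simp [h]
      | succ m =>
        simp only [List.length_cons, List.getD_cons_succ]
        constructor
        · intro hc; exact absurd hc (by simp)
        · rintro ⟨_, _, hall⟩
          exact absurd (hall 0 (Nat.succ_pos _)) (by simpa using h)
    · simp only [firstGe, ge_iff_le, h, if_neg, not_false_iff]
      cases n with
      | zero =>
        simp only [Option.map_eq_some_iff, List.getD_cons_zero]
        constructor
        · rintro ⟨m, _, hm⟩; omega
        · rintro ⟨_, ht, _⟩; exact absurd ht h
      | succ m =>
        simp only [Option.map_eq_some_iff, List.length_cons, List.getD_cons_succ]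
        constructor
        · rintro ⟨m', hm', heq⟩
          have : m' = m := by omega
          subst this
          obtain ⟨h1, h2, h3⟩ := (ih m').mp hm'
          refine ⟨by omega, h2, ?_⟩
          intro k hk
          cases k with
          | zero => simpa using lt_of_not_ge h
          | succ j => simpa using h3 j (by omega)
        · rintro ⟨h1, h2, h3⟩
          refine ⟨m, (ih m).mpr ⟨by omega, h2, ?_⟩, rfl⟩
          intro k hk
          simpa using h3 (k + 1) (by omega)

lemma aLoop_false (start end_ : Int) :
    ∀ (xs : List Int) (num : Nat) (si : Option Nat),
      aLoop xs num false si start end_ = (si, (firstGe end_ xs).map (fun e => num + e)) := by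
  intro xs
  induction xs with
  | nil => intro num si; simp [aLoop, firstGe]
  | cons i rest ih =>
    intro num si
    by_cases he : end_ ≤ i
    · simp [aLoop, firstGe, he]
    · simp only [aLoop, firstGe, ge_iff_le, he, if_neg, not_false_iff, Bool.false_eq_true,
        if_false]
      rw [ih]
      cases haf : firstGe end_ rest <;> simp [haf] <;> omega

lemma aLoop_true (start end_ : Int) :
    ∀ (xs : List Int) (num s e : Nat),
      firstGe start xs = some s → firstGe end_ xs = some e → s ≤ e →
      aLoop xs num true none start end_ = (some (num + s), some (num + e)) := by
  intro xs
  induction xs with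
  | nil => intro num s e hs; simp [firstGe] at hs
  | cons i rest ih =>
    intro num s e hs he hse
    by_cases hs0 : start ≤ i
    · have hs' : s = 0 := by
        simp [firstGe, hs0] at hs; omega
      subst hs'
      by_cases he0 : end_ ≤ i
      · have he' : e = 0 := by simp [firstGe, he0] at he; omega
        subst he'
        simp [aLoop, hs0, he0]
      · obtain ⟨e', he', rfl⟩ : ∃ e', firstGe end_ rest = some e' ∧ e = e' + 1 := by
          simp [firstGe, he0] at he
          obtain ⟨e', h1, h2⟩ := he
          exact ⟨e', h1, h2.symm⟩
        simp only [aLoop, ge_iff_le, hs0, if_pos, he0, if_neg, not_false_iff, if_true]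
        rw [aLoop_false, he']
        simp; omega
    · obtain ⟨s', hs', rfl⟩ : ∃ s', firstGe start rest = some s' ∧ s = s' + 1 := by
        simp [firstGe, hs0] at hs
        obtain ⟨s', h1, h2⟩ := hs
        exact ⟨s', h1, h2.symm⟩
      by_cases he0 : end_ ≤ i
      · have : e = 0 := by simp [firstGe, he0] at he; omega
        omega
      · obtain ⟨e', he', rfl⟩ : ∃ e', firstGe end_ rest = some e' ∧ e = e' + 1 := by
          simp [firstGe, he0] at he
          obtain ⟨e', h1, h2⟩ := he
          exact ⟨e', h1, h2.symm⟩
        simp only [aLoop, ge_iff_le, hs0, if_neg, not_false_iff, he0, if_true]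
        rw [ih (num + 1) s' e' hs' he' (by omega)]
        have h1 : num + 1 + s' = num + (s' + 1) := by omega
        have h2 : num + 1 + e' = num + (e' + 1) := by omega
        rw [h1, h2]

-- the append loop over range(s, e, 1) builds exactly (y.drop s).take (e - s)
lemma map_getD_pyRange (y : List Int) (s e : Nat) (hse : s ≤ e) (hey : e ≤ y.length) :
    (PySem.List.pyRange (s : Int) (e : Int) 1).map (fun i => PySem.List.pyGetD y i 0)
      = (y.drop s).take (e - s) := by
  rw [PySem.List.pyRange_one]
  have hcast : ((e : Int) - (s : Int)).toNat = e - s := by omega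
  rw [hcast, List.map_map]
  apply List.ext_getElem
  · simp; omega
  · intro k h1 h2
    have hk : k < e - s := by simpa using h1
    simp only [List.getElem_map, List.getElem_range, Function.comp_apply]
    have : ((s : Int) + (k : Int)) = ((s + k : Nat) : Int) := by push_cast; ring
    rw [this, PySem.List.pyGetD_natCast]
    rw [List.getElem_take, List.getElem_drop]
    rw [List.getD_eq_getElem y 0 (by omega)]

lemma findIdx_exists (t : Int) (xs : List Int) (j : Nat) (hj : j < xs.length)
    (ht : t ≤ xs.getD j 0) : ∃ m, firstGe t xs = some m ∧ m ≤ j := by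
  have hne : ∃ k, k < xs.length ∧ t ≤ xs.getD k 0 := ⟨j, hj, ht⟩
  set m := Nat.find hne with hmdef
  have hm : m < xs.length ∧ t ≤ xs.getD m 0 := Nat.find_spec hne
  have hmin : ∀ k, k < m → ¬(k < xs.length ∧ t ≤ xs.getD k 0) := fun k hk => Nat.find_min hne hk
  refine ⟨m, ?_, ?_⟩
  · rw [firstGe_eq_some_iff]
    refine ⟨hm.1, hm.2, ?_⟩
    intro k hk
    by_contra hc
    exact hmin k hk ⟨by omega, by omega⟩
  · by_contra hc
    exact hmin j (by omega) ⟨hj, ht⟩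

-- generic: a dropWhile whose predicate holds on the first m positions and fails at m
lemma dropWhile_eq_drop {α : Type} (p : α → Bool) (l : List α) (m : Nat)
    (h1 : ∀ k (hk : k < m) (hl : k < l.length), p l[k] = true)
    (h2 : ∀ hl : m < l.length, p l[m] = false) :
    l.dropWhile p = l.drop m := by
  induction l generalizing m with
  | nil => simp
  | cons a rest ih =>
    cases m with
    | zero =>
      have := h2 (by simp)
      simp only [List.getElem_cons_zero] at this
      simp [List.dropWhile, this]
    | succ n =>
      have ha : p a = true := by simpa using h1 0 (Nat.succ_pos _) (by simp)
      simp only [List.dropWhile, ha, List.drop_succ_cons]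
      exact ih n (fun k hk hl => by simpa using h1 (k + 1) (by omega) (by simpa using hl))
        (fun hl => by simpa using h2 (by simpa using hl))

-- generic: a takeWhile whose predicate holds on the first n positions and fails at n
lemma takeWhile_eq_take {α : Type} (p : α → Bool) (l : List α) (n : Nat)
    (h1 : ∀ k (hk : k < n) (hl : k < l.length), p l[k] = true)
    (h2 : ∀ hl : n < l.length, p l[n] = false) :
    l.takeWhile p = l.take n := by
  induction l generalizing n with
  | nil => simp
  | cons a rest ih =>
    cases n with
    | zero =>
      have := h2 (by simp)
      simp only [List.getElem_cons_zero] at this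
      simp [List.takeWhile, this]
    | succ n =>
      have ha : p a = true := by simpa using h1 0 (Nat.succ_pos _) (by simp)
      simp only [List.takeWhile, ha, List.take_succ_cons]
      rw [ih n (fun k hk hl => by simpa using h1 (k + 1) (by omega) (by simpa using hl))
        (fun hl => by simpa using h2 (by simpa using hl))]

-- ===== VERDICT (by name: the statement is the Claim_ definition above) =====
theorem get_values_between_time_spec : Claim_equal_get_values_between_time := by
  intro x y start end_ _ hpre
  obtain ⟨e, hel, hee, hemin, ⟨s, hse, hss⟩, hcase⟩ := hpre
  have hfe : firstGe end_ x = some e := by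
    rw [firstGe_eq_some_iff]; exact ⟨hel, hee, hemin⟩
  obtain ⟨m, hfm, hms⟩ := findIdx_exists start x s (by omega) hss
  have hme : m ≤ e := le_trans hms hse
  obtain ⟨hml, hmge, hmmin⟩ := (firstGe_eq_some_iff start x m).mp hfm
  unfold Spec_get_values_between_time get_values_between_time get_values_between_time_alt
  rw [aLoop_true start end_ x 0 m e hfm hfe hme]
  simp only [Nat.zero_add]
  rw [PySem.List.foldl_append_singleton_eq_map]
  -- B side: dropWhile = drop m, takeWhile = take (e - m)
  set z := x.zip y with hz
  have hzget : ∀ k (hk : k < z.length), z[k] = (x[k]'(by simp [hz] at hk; omega),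
      y[k]'(by simp [hz] at hk; omega)) := by
    intro k hk; simp [hz]
  have hdrop : z.dropWhile (fun p => decide (p.1 < start)) = z.drop m := by
    apply dropWhile_eq_drop
    · intro k hk hl
      rw [hzget k hl]
      simp only [decide_eq_true_eq]
      have := hmmin k hk
      rwa [List.getD_eq_getElem x 0 (by simp [hz] at hl; omega)] at this
    · intro hl
      rw [hzget m hl]
      simp only [decide_eq_false_iff_not, not_lt]
      rwa [List.getD_eq_getElem x 0 hml] at hmge
  have htake : (z.drop m).takeWhile (fun p => decide (p.1 < end_)) = (z.drop m).take (e - m) := by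
    apply takeWhile_eq_take
    · intro k hk hl
      have hkl : m + k < z.length := by simp at hl; omega
      rw [List.getElem_drop, hzget (m + k) hkl]
      simp only [decide_eq_true_eq]
      have := hemin (m + k) (by omega)
      rwa [List.getD_eq_getElem x 0 (by simp [hz] at hkl; omega)] at this
    · intro hl
      have hkl : m + (e - m) < z.length := by simp at hl; omega
      have heq : m + (e - m) = e := by omega
      rw [List.getElem_drop, hzget (m + (e - m)) hkl]
      simp only [decide_eq_false_iff_not, not_lt, heq]
      rwa [List.getD_eq_getElem x 0 hel] at hee
  rw [hdrop, htake]
  -- both sides equal (y.drop m).take (e - m)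
  rcases hcase with hey | ⟨hse', hmin'⟩
  · rw [map_getD_pyRange y m e hme hey]
    apply List.ext_getElem
    · simp [hz]; omega
    · intro k h1 h2
      simp only [hz, List.nil_append, List.getElem_map, List.getElem_take,
        List.getElem_drop, List.getElem_zip]
  · have hmeq : m = e := by
      by_contra hne
      have := hmin' m (by omega)
      rw [List.getD_eq_getElem x 0 hml] at this
      rw [List.getD_eq_getElem x 0 hml] at hmge
      omega
    subst hmeq
    rw [PySem.List.pyRange_one_eq_nil (by omega)]
    simp
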